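-- pv_equiv track=rewrite | github.com/jatziri2/Ing-Software-2024-2 | Script2.py | contar_valles
-- ===== SOURCE A (Python) =====
-- def contar_valles(pasos):
--     nivel_del_mar = 0
--     nivel_actual = 0
--     cantidad_valles = 0
--
--     for paso in pasos:
--         if paso == 'U':
--             nivel_actual += 1
--         elif paso == 'D':
--             nivel_actual -= 1
--
--         if paso == 'U' and nivel_actual == nivel_del_mar:
--             cantidad_valles += 1
--
--     return cantidad_valles
-- ===== SOURCE B (Python) =====
-- from itertools import accumulate
--
-- def contar_valles(pasos):
--     alturas = list(accumulate((1 if p == 'U' else -1 if p == 'D' else 0 for p in pasos), initial=0))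
--     return sum(1 for prev, cur in zip(alturas, alturas[1:]) if prev < 0 and cur == 0)
-- ===== Notes on version B (the rewrite author's own statement) =====
-- stated objective: alternative
-- what changed: B splits the fused loop into two passes: a prefix-sum (accumulate) builds the altitude sequence, then a second pass counts zero-crossings from a strictly negative altitude, instead of A's single loop tracking level and count together.
import Mathlib
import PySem

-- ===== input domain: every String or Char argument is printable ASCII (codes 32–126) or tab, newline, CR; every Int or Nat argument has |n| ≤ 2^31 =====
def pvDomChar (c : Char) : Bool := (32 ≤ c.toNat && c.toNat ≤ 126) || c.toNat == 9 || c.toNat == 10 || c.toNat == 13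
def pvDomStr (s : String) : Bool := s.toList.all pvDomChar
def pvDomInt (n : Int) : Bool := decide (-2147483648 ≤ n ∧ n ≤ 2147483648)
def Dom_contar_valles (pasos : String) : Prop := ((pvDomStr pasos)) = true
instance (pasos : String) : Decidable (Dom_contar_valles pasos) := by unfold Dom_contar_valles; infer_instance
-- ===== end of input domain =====

-- B replaces A's fused level/count loop by two passes: a prefix-sum of step deltas, then a
-- count of zero-crossings from strictly negative altitude (objective: alternative decomposition).

-- ===== PORT A =====
-- one fold step of A's loop: state = (nivel_actual, cantidad_valles); nivel_del_mar = 0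
def pvStepA (st : Int × Int) (paso : Char) : Int × Int :=
  let nivel := if paso = 'U' then st.1 + 1 else if paso = 'D' then st.1 - 1 else st.1
  (nivel, if paso = 'U' ∧ nivel = 0 then st.2 + 1 else st.2)

def contar_valles (pasos : String) : Int :=
  (pasos.toList.foldl pvStepA (0, 0)).2

-- ===== PORT B =====
-- the delta each step contributes to the altitude (Source B's generator expression)
def pvDelta (p : Char) : Int := if p = 'U' then 1 else if p = 'D' then -1 else 0

-- Source B's pair predicate: prev < 0 and cur == 0
def pvEsValle (pc : Int × Int) : Bool := pc.1 < 0 && pc.2 == 0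

def contar_valles_alt (pasos : String) : Int :=
  let alturas := List.scanl (· + ·) 0 (pasos.toList.map pvDelta)  -- accumulate(..., initial=0)
  ((alturas.zip alturas.tail).countP pvEsValle : Nat)             -- sum(1 for ... if ...)

-- ===== PRECONDITION & SPEC =====
def Spec_contar_valles (pasos : String) (out : Int) : Prop := out = contar_valles_alt pasos
instance (pasos : String) (out : Int) : Decidable (Spec_contar_valles pasos out) := by unfold Spec_contar_valles; infer_instance

-- ===== CLAIM (what is proved, stated in full; the proofs are below) =====
def Claim_equal_contar_valles : Prop := ∀ (pasos : String), Dom_contar_valles pasos → Spec_contar_valles pasos (contar_valles pasos)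

-- ===== LEMMAS AND PROOFS =====

-- proof-only helper: the valley count over consecutive altitude pairs, running altitude b
def pvPairCount (b : Int) : List Int → Nat
  | [] => 0
  | d :: ds => (if pvEsValle (b, b + d) then 1 else 0) + pvPairCount (b + d) ds

lemma pv_zipcount : ∀ (ds : List Int) (b : Int),
    ((List.scanl (· + ·) b ds).zip (List.scanl (· + ·) b ds).tail).countP pvEsValle
      = pvPairCount b ds := by
  intro ds
  induction ds with
  | nil => intro b; simp [pvPairCount]
  | cons d ds ih =>
    intro b
    cases ds with
    | nil => simp [pvPairCount, List.countP_cons]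
    | cons e es =>
      have h := ih (b + d)
      simp only [List.scanl_cons, List.tail_cons, List.zip_cons_cons, List.countP_cons] at h ⊢
      simp [pvPairCount, h]
      omega

lemma pv_fold : ∀ (l : List Char) (n c : Int),
    (l.foldl pvStepA (n, c)).2 = c + (pvPairCount n (l.map pvDelta) : Int) := by
  intro l
  induction l with
  | nil => intro n c; simp [pvPairCount]
  | cons p l ih =>
    intro n c
    have hstep : pvStepA (n, c) p
        = (n + pvDelta p, c + if pvEsValle (n, n + pvDelta p) then 1 else 0) := by
      by_cases hU : p = 'U'
      · simp [pvStepA, pvDelta, pvEsValle, hU]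
        split_ifs with h1 h2 <;> omega
      · by_cases hD : p = 'D'
        · simp [pvStepA, pvDelta, pvEsValle, hD]
          omega
        · simp [pvStepA, pvDelta, pvEsValle, hU, hD]
          omega
    simp only [List.foldl_cons, hstep, List.map_cons, pvPairCount]
    rw [ih]
    push_cast
    split_ifs <;> ring

-- ===== VERDICT (by name: the statement is the Claim_ definition above) =====
theorem contar_valles_spec : Claim_equal_contar_valles := by
  intro pasos _
  unfold Spec_contar_valles contar_valles contar_valles_alt
  dsimp only
  rw [pv_fold, pv_zipcount]
  simp
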